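-- pv_equiv track=rewrite | github.com/tim-nix/Advent-of-Code-2025 | Day 09/problem09b.py | countWalls
-- ===== SOURCE A (Python) =====
-- def countWalls(min_x, rec_x, rec_y, walls):
--    enterWall = False
--    walls_before = 0
--    for x in range(min_x, rec_x + 1):
--       if x <= rec_x:
--          if (x, rec_y) in walls:
--             enterWall = True
--          elif ((x, rec_y) not in walls) and enterWall:
--             walls_before += 1
--             enterWall = False
--
--    return walls_before
-- ===== SOURCE B (Python) =====
-- def countWalls(min_x, rec_x, rec_y, walls):
--     row = {x for (x, y) in walls if y == rec_y}
--     return sum(1 for w in row if min_x <= w < rec_x and (w + 1) not in row)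
-- ===== Notes on version B (the rewrite author's own statement) =====
-- stated objective: faster
-- what changed: Replaces A's column-by-column scan with a flag over the whole range [min_x, rec_x] by building the set of wall x-coordinates in the target row and counting members w with min_x <= w < rec_x whose right neighbour is not a wall, so cost depends on the number of walls, not the range width.
import Mathlib
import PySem

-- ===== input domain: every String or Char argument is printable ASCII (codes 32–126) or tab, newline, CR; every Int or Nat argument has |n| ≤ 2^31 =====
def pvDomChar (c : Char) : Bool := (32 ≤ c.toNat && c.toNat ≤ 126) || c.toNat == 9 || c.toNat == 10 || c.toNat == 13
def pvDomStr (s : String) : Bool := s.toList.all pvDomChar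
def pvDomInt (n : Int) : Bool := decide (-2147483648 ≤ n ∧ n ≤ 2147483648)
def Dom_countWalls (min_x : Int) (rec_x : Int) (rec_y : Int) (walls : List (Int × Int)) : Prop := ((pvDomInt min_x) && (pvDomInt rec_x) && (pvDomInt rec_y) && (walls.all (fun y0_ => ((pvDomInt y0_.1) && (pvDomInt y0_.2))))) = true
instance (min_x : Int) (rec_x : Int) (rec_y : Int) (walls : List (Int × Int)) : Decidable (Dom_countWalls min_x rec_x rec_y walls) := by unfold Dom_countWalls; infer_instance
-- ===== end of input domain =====

-- B replaces A's column-by-column scan over [min_x, rec_x] by a set of wall x-coordinates in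
-- the target row and counts its members w with min_x ≤ w < rec_x whose right neighbour is not
-- a wall (objective: alternative decomposition; cost proportional to walls, not to the range).

-- ===== PORT A =====
-- loop body of A's for-loop, named so the proofs can speak about it (a literal transcription)
def countWallsStep (rec_x : Int) (rec_y : Int) (walls : List (Int × Int)) (s : Bool × Int) (x : Int) : Bool × Int :=
  if x ≤ rec_x then
    if walls.contains (x, rec_y) then (true, s.2)
    else if !walls.contains (x, rec_y) && s.1 then (false, s.2 + 1)
    else s
  else s

def countWalls (min_x : Int) (rec_x : Int) (rec_y : Int) (walls : List (Int × Int)) : Int :=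
  ((PySem.List.pyRange min_x (rec_x + 1) 1).foldl (countWallsStep rec_x rec_y walls) (false, 0)).2

-- ===== PORT B =====
def countWalls_alt (min_x : Int) (rec_x : Int) (rec_y : Int) (walls : List (Int × Int)) : Int :=
  let row : PySem.Set Int :=
    PySem.Set.ofList (walls.filterMap (fun p => if p.2 == rec_y then some p.1 else none))
  ((row.countP (fun w => decide (min_x ≤ w) && decide (w < rec_x) && !(PySem.Set.contains row (w + 1)))) : Int)

-- ===== PRECONDITION & SPEC =====
def Spec_countWalls (min_x : Int) (rec_x : Int) (rec_y : Int) (walls : List (Int × Int)) (out : Int) : Prop := out = countWalls_alt min_x rec_x rec_y walls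
instance (min_x : Int) (rec_x : Int) (rec_y : Int) (walls : List (Int × Int)) (out : Int) : Decidable (Spec_countWalls min_x rec_x rec_y walls out) := by unfold Spec_countWalls; infer_instance

-- ===== CLAIM (what is proved, stated in full; the proofs are below) =====
def Claim_equal_countWalls : Prop := ∀ (min_x : Int) (rec_x : Int) (rec_y : Int) (walls : List (Int × Int)), Dom_countWalls min_x rec_x rec_y walls → Spec_countWalls min_x rec_x rec_y walls (countWalls min_x rec_x rec_y walls)

-- ===== LEMMAS AND PROOFS =====

-- the common mathematical value: falling edges counted over the integer range [min_x, rec_x)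
def edgeCount (min_x : Int) (rec_x : Int) (rec_y : Int) (walls : List (Int × Int)) : Int :=
  ((PySem.List.pyRange min_x rec_x 1).countP
    (fun w => walls.contains (w, rec_y) && !walls.contains (w + 1, rec_y)) : Int)

-- loop invariant of A: after scanning [a, b], the flag is "b is a wall" and the counter is the
-- number of falling edges in [a, b)
lemma countWalls_inv (rec_x : Int) (rec_y : Int) (walls : List (Int × Int)) (a : Int) :
    ∀ b : Int, a ≤ b → b ≤ rec_x →
      (PySem.List.pyRange a (b + 1) 1).foldl (countWallsStep rec_x rec_y walls) (false, 0)
        = (walls.contains (b, rec_y), edgeCount a b rec_y walls) := by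
  intro b hab
  induction b, hab using Int.le_induction with
  | base =>
    intro hle
    simp [PySem.List.pyRange_one_singleton, edgeCount,
      PySem.List.pyRange_one_eq_nil (le_refl a), countWallsStep, hle]
    cases h : walls.contains (a, rec_y) <;> simp_all
  | succ b hb ih =>
    intro hle
    have hle' : b ≤ rec_x := by omega
    rw [PySem.List.pyRange_one_succ_right (by omega : a ≤ b + 1), List.foldl_append,
      ih hle']
    have hr : PySem.List.pyRange a (b + 1) 1 = PySem.List.pyRange a b 1 ++ [b] :=
      PySem.List.pyRange_one_succ_right hb
    simp only [List.foldl_cons, List.foldl_nil, countWallsStep, edgeCount, hr,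
      List.countP_append, List.countP_cons, List.countP_nil, if_pos hle]
    cases h1 : walls.contains (b + 1, rec_y) <;>
      cases h2 : walls.contains (b, rec_y) <;>
        simp_all

-- A computes edgeCount
lemma countWalls_eq_edgeCount (min_x rec_x rec_y : Int) (walls : List (Int × Int)) :
    countWalls min_x rec_x rec_y walls = edgeCount min_x rec_x rec_y walls := by
  by_cases h : min_x ≤ rec_x
  · rw [countWalls, countWalls_inv rec_x rec_y walls min_x rec_x h (le_refl rec_x)]
  · rw [countWalls, edgeCount,
      PySem.List.pyRange_one_eq_nil (by omega : rec_x + 1 ≤ min_x),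
      PySem.List.pyRange_one_eq_nil (by omega : rec_x ≤ min_x)]
    simp

-- membership in B's set "row"
lemma mem_row (rec_y : Int) (walls : List (Int × Int)) (w : Int) :
    w ∈ PySem.Set.ofList (walls.filterMap (fun p => if p.2 == rec_y then some p.1 else none))
      ↔ (w, rec_y) ∈ walls := by
  rw [PySem.Set.mem_ofList, List.mem_filterMap]
  constructor
  · rintro ⟨⟨x, y⟩, hp, hv⟩
    by_cases hy : y = rec_y <;> simp [hy] at hv
    subst hy; subst hv; exact hp
  · intro hw; exact ⟨(w, rec_y), hw, by simp⟩

-- B computes edgeCount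
lemma countWalls_alt_eq_edgeCount (min_x rec_x rec_y : Int) (walls : List (Int × Int)) :
    countWalls_alt min_x rec_x rec_y walls = edgeCount min_x rec_x rec_y walls := by
  rw [countWalls_alt, edgeCount]
  set row := PySem.Set.ofList (walls.filterMap (fun p => if p.2 == rec_y then some p.1 else none)) with hrow
  congr 1
  rw [List.countP_eq_length_filter, List.countP_eq_length_filter]
  have hcont : ∀ w : Int, PySem.Set.contains row w = walls.contains (w, rec_y) := by
    intro w
    simp only [PySem.Set.contains]
    rw [Bool.eq_iff_iff]
    simp only [List.contains_iff_mem, hrow, mem_row]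
  apply List.Perm.length_eq
  rw [List.perm_ext_iff_of_nodup (List.Nodup.filter _ (PySem.Set.nodup_ofList _))
      (List.Nodup.filter _ (PySem.List.nodup_pyRange_one _ _))]
  intro w
  simp only [List.mem_filter, PySem.List.mem_pyRange_one, hcont, ← hrow]
  rw [show (w ∈ row) ↔ ((w, rec_y) ∈ walls) from hrow ▸ mem_row rec_y walls w]
  simp only [Bool.and_eq_true, decide_eq_true_eq, Bool.not_eq_eq_eq_not, List.contains_iff_mem]
  tauto

-- ===== VERDICT (by name: the statement is the Claim_ definition above) =====
theorem countWalls_spec : Claim_equal_countWalls := by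
  intro min_x rec_x rec_y walls _
  unfold Spec_countWalls
  rw [countWalls_eq_edgeCount, countWalls_alt_eq_edgeCount]
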